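-- pv_equiv track=rewrite | github.com/silkyrich/uk-curriculum-as-graph | generated/aqa-trade-materials/render.py | slide_rels_xml
-- ===== SOURCE A (Python) =====
-- def slide_rels_xml(idx, img_map, has_notes):
--     rels = (
--         '<Relationship Id="rId1" '
--         'Type="http://schemas.openxmlformats.org/officeDocument/2006/relationships/slideLayout" '
--         'Target="../slideLayouts/slideLayout1.xml"/>\n'
--     )
--     for rid, target in sorted(img_map.items()):
--         rels += (f'<Relationship Id="{rid}" '
--                  'Type="http://schemas.openxmlformats.org/officeDocument/2006/relationships/image" '
--                  f'Target="{target}"/>\n')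
--     if has_notes:
--         rels += (f'<Relationship Id="rIdN" '
--                  'Type="http://schemas.openxmlformats.org/officeDocument/2006/relationships/notesSlide" '
--                  f'Target="../notesSlides/notesSlide{idx}.xml"/>\n')
--     return (
--         '<?xml version="1.0" encoding="UTF-8" standalone="yes"?>'
--         '<Relationships xmlns="http://schemas.openxmlformats.org/package/2006/relationships">'
--         f'{rels}</Relationships>'
--     )
-- ===== SOURCE B (Python) =====
-- _TMPL = ('<Relationship Id="{}" Type="http://schemas.openxmlformats.org/'
--          'officeDocument/2006/relationships/{}" Target="{}"/>\n')
--
-- def slide_rels_xml(idx, img_map, has_notes):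
--     entries = [("rId1", "slideLayout", "../slideLayouts/slideLayout1.xml")]
--     entries.extend((rid, "image", target) for rid, target in sorted(img_map.items()))
--     if has_notes:
--         entries.append(("rIdN", "notesSlide", f"../notesSlides/notesSlide{idx}.xml"))
--     body = "".join(_TMPL.format(rid, kind, target) for rid, kind, target in entries)
--     return ('<?xml version="1.0" encoding="UTF-8" standalone="yes"?>'
--             '<Relationships xmlns="http://schemas.openxmlformats.org/package/2006/relationships">'
--             f'{body}</Relationships>')
-- ===== Notes on version B (the rewrite author's own statement) =====
-- stated objective: simpler
-- what changed: Replaces A's three hardcoded inline concatenation blocks by building one list of (id, kind, target) relationship records and formatting all of them through a single shared template joined in one pass.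
import Mathlib
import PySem

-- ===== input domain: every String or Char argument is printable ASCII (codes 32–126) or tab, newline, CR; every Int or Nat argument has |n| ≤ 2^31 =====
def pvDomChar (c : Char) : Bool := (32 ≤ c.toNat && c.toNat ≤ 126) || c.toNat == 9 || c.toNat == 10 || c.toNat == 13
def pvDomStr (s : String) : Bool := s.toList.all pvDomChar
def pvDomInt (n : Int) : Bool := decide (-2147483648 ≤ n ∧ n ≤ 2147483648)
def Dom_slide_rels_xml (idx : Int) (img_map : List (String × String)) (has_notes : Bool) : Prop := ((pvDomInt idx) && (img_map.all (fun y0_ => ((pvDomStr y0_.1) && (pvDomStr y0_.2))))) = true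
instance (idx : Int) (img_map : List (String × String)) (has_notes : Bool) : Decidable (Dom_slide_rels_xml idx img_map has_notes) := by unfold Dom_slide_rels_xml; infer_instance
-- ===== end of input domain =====

-- B replaces A's three hardcoded inline format blocks by one record list (id, kind, target)
-- formatted through a single shared template and joined; objective: simpler, same output byte for byte.

-- ===== PORT A =====
-- sorted(img_map.items()): dict keys are unique, so Python's tuple sort equals a (stable) sort by key.
def slide_rels_xml (idx : Int) (img_map : List (String × String)) (has_notes : Bool) : String :=
  let rels : String := "<Relationship Id=\"rId1\" Type=\"http://schemas.openxmlformats.org/officeDocument/2006/relationships/slideLayout\" Target=\"../slideLayouts/slideLayout1.xml\"/>\n"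
  let rels : String :=
    (PySem.List.sorted (PySem.Dict.ofList img_map).items (fun p => p.1) false).foldl
      (fun acc p =>
        acc ++ ("<Relationship Id=\"" ++ p.1 ++ "\" Type=\"http://schemas.openxmlformats.org/officeDocument/2006/relationships/image\" Target=\"" ++ p.2 ++ "\"/>\n"))
      rels
  let rels : String :=
    if has_notes then
      rels ++ ("<Relationship Id=\"rIdN\" Type=\"http://schemas.openxmlformats.org/officeDocument/2006/relationships/notesSlide\" Target=\"../notesSlides/notesSlide" ++ PySem.Int.toStr idx ++ ".xml\"/>\n")
    else rels
  "<?xml version=\"1.0\" encoding=\"UTF-8\" standalone=\"yes\"?><Relationships xmlns=\"http://schemas.openxmlformats.org/package/2006/relationships\">" ++ rels ++ "</Relationships>"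

-- ===== PORT B =====
-- _TMPL.format(rid, kind, target)
def pvRelLine (rid kind target : String) : String :=
  "<Relationship Id=\"" ++ rid ++ "\" Type=\"http://schemas.openxmlformats.org/officeDocument/2006/relationships/" ++ kind ++ "\" Target=\"" ++ target ++ "\"/>\n"

def slide_rels_xml_alt (idx : Int) (img_map : List (String × String)) (has_notes : Bool) : String :=
  let entries : List (String × String × String) :=
    ("rId1", "slideLayout", "../slideLayouts/slideLayout1.xml") ::
      ((PySem.List.sorted (PySem.Dict.ofList img_map).items (fun p => p.1) false).map
          (fun p => (p.1, "image", p.2)) ++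
        (if has_notes then
          [("rIdN", "notesSlide", "../notesSlides/notesSlide" ++ PySem.Int.toStr idx ++ ".xml")]
        else []))
  let body : String := PySem.Str.join "" (entries.map (fun e => pvRelLine e.1 e.2.1 e.2.2))
  "<?xml version=\"1.0\" encoding=\"UTF-8\" standalone=\"yes\"?><Relationships xmlns=\"http://schemas.openxmlformats.org/package/2006/relationships\">" ++ body ++ "</Relationships>"

-- ===== PRECONDITION & SPEC =====
def Spec_slide_rels_xml (idx : Int) (img_map : List (String × String)) (has_notes : Bool) (out : String) : Prop := out = slide_rels_xml_alt idx img_map has_notes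
instance (idx : Int) (img_map : List (String × String)) (has_notes : Bool) (out : String) : Decidable (Spec_slide_rels_xml idx img_map has_notes out) := by unfold Spec_slide_rels_xml; infer_instance

-- ===== CLAIM (what is proved, stated in full; the proofs are below) =====
def Claim_equal_slide_rels_xml : Prop := ∀ (idx : Int) (img_map : List (String × String)) (has_notes : Bool), Dom_slide_rels_xml idx img_map has_notes → Spec_slide_rels_xml idx img_map has_notes (slide_rels_xml idx img_map has_notes)

-- ===== LEMMAS AND PROOFS =====
theorem pv_join_nilsep (parts : List (List Char)) : PySem.Chars.join [] parts = parts.flatten := by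
  show List.intercalate [] parts = _
  induction parts with
  | nil => simp [List.intercalate]
  | cons a t ih => cases t <;> simp_all [List.intercalate, List.intersperse]

theorem pv_foldl_str {α : Type} (L : List α) (f : α → String) (init : String) :
    (L.foldl (fun acc x => acc ++ f x) init).toList
      = init.toList ++ (L.map (fun x => (f x).toList)).flatten := by
  induction L generalizing init with
  | nil => simp
  | cons a t ih => simp [ih]

-- ===== VERDICT (by name: the statement is the Claim_ definition above) =====
set_option maxRecDepth 20000 in
set_option maxHeartbeats 2000000 in
theorem slide_rels_xml_spec : Claim_equal_slide_rels_xml := by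
  intro idx img_map has_notes _
  show _ = _
  unfold slide_rels_xml slide_rels_xml_alt
  apply String.toList_injective
  dsimp only
  generalize (PySem.List.sorted (PySem.Dict.ofList img_map).items fun p => p.1) = L
  cases has_notes <;>
    · simp only [if_true, if_false, Bool.false_eq_true, pv_foldl_str, PySem.Str.toList_join,
        pvRelLine, String.toList_append, List.map_append, List.map_cons, List.map_map,
        List.map_nil, List.append_assoc, List.append_nil]
      simp [pv_join_nilsep, Function.comp_def]
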